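-- pv_equiv track=rewrite | github.com/pcur/ARC-Challenge | augment_arc_training_data.py | transform_pair
-- ===== SOURCE A (Python) =====
-- from typing import Dict, List, Sequence, Tuple
--
-- Grid = List[List[int]]
--
-- def rotate_grid(grid: Grid, k: int) -> Grid:
--     """
--     Rotates a grid by k * 90 degrees counterclockwise.
--     k can be 0, 1, 2, or 3.
--     """
--     k = k % 4
--
--     if k == 0:
--         return [row[:] for row in grid]
--
--     out = [row[:] for row in grid]
--
--     for _ in range(k):
--         # Counterclockwise rotation:
--         # transpose then reverse row order.
--         out = [list(row) for row in zip(*out)][::-1]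
--
--     return out
--
-- def flip_horizontal(grid: Grid) -> Grid:
--     """
--     Mirrors left-right.
--     """
--     return [list(reversed(row)) for row in grid]
--
-- def flip_vertical(grid: Grid) -> Grid:
--     """
--     Mirrors top-bottom.
--     """
--     return [row[:] for row in reversed(grid)]
--
-- def transpose_grid(grid: Grid) -> Grid:
--     """
--     Swaps rows and columns.
--     This is useful for ARC but optional because it changes orientation differently than rotation/flip.
--     """
--     return [list(row) for row in zip(*grid)]
--
-- def apply_spatial_transform(grid: Grid, transform_name: str) -> Grid:
--     if transform_name == "identity":
--         return [row[:] for row in grid]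
--     if transform_name == "rot90":
--         return rotate_grid(grid, 1)
--     if transform_name == "rot180":
--         return rotate_grid(grid, 2)
--     if transform_name == "rot270":
--         return rotate_grid(grid, 3)
--     if transform_name == "flip_h":
--         return flip_horizontal(grid)
--     if transform_name == "flip_v":
--         return flip_vertical(grid)
--     if transform_name == "transpose":
--         return transpose_grid(grid)
--
--     raise ValueError(f"Unknown spatial transform: {transform_name}")
--
-- def apply_color_permutation(grid: Grid, perm: Sequence[int]) -> Grid:
--     """
--     Applies a color remapping.
--
--     perm[old_color] = new_color
--
--     Example:
--         perm = [0,2,1,3,4,5,6,7,8,9]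
--         color 1 becomes 2
--         color 2 becomes 1
--     """
--     if len(perm) != 10:
--         raise ValueError("Color permutation must have length 10")
--
--     if sorted(perm) != list(range(10)):
--         raise ValueError(f"Invalid color permutation: {perm}")
--
--     return [[perm[value] for value in row] for row in grid]
--
-- def transform_pair(pair: Dict[str, Grid], spatial: str, color_perm: Sequence[int]) -> Dict[str, Grid]:
--     new_pair = {}
--
--     if "input" in pair:
--         x = apply_spatial_transform(pair["input"], spatial)
--         x = apply_color_permutation(x, color_perm)
--         new_pair["input"] = x
--
--     if "output" in pair:
--         y = apply_spatial_transform(pair["output"], spatial)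
--         y = apply_color_permutation(y, color_perm)
--         new_pair["output"] = y
--
--     # Preserve any extra keys, though official ARC usually only has input/output.
--     for k, v in pair.items():
--         if k not in new_pair:
--             new_pair[k] = v
--
--     return new_pair
-- ===== SOURCE B (Python) =====
-- from typing import Dict, List, Sequence
--
-- Grid = List[List[int]]
--
--
-- def transform_pair(pair: Dict[str, Grid], spatial: str, color_perm: Sequence[int]) -> Dict[str, Grid]:
--     # One fused pass per grid: each output cell is color_perm[source cell],
--     # with the source coordinate given by a closed-form index map per transform
--     # (no repeated 90-degree rotation steps).
--     def mapped(grid: Grid) -> Grid: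
--         if spatial not in ("identity", "rot90", "rot180", "rot270", "flip_h", "flip_v", "transpose"):
--             raise ValueError(f"Unknown spatial transform: {spatial}")
--         if len(color_perm) != 10:
--             raise ValueError("Color permutation must have length 10")
--         if sorted(color_perm) != list(range(10)):
--             raise ValueError(f"Invalid color permutation: {color_perm}")
--         if spatial == "identity":
--             return [[color_perm[v] for v in row] for row in grid]
--         if spatial == "flip_h":
--             return [[color_perm[v] for v in reversed(row)] for row in grid]
--         if spatial == "flip_v":
--             return [[color_perm[v] for v in row] for row in reversed(grid)]
--         R = len(grid)
--         C = len(grid[0]) if grid else 0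
--         if spatial == "rot90":
--             rows, cols, src = C, R, lambda i, j: (j, C - 1 - i)
--         elif spatial == "rot180":
--             rows, cols, src = R, C, lambda i, j: (R - 1 - i, C - 1 - j)
--         elif spatial == "rot270":
--             rows, cols, src = C, R, lambda i, j: (R - 1 - j, i)
--         else:  # transpose
--             rows, cols, src = C, R, lambda i, j: (j, i)
--         return [[color_perm[grid[src(i, j)[0]][src(i, j)[1]]] for j in range(cols)]
--                 for i in range(rows)]
--
--     new_pair = {}
--     if "input" in pair:
--         new_pair["input"] = mapped(pair["input"])
--     if "output" in pair:
--         new_pair["output"] = mapped(pair["output"])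
--     for k, v in pair.items():
--         if k not in new_pair:
--             new_pair[k] = v
--     return new_pair
-- ===== Notes on version B (the rewrite author's own statement) =====
-- stated objective: alternative
-- what changed: B replaces A's iterated zip-transpose-reverse rotation steps with one fused pass per grid: each spatial transform is a closed-form source-index map and the color permutation lookup is applied in the same comprehension, instead of building intermediate rotated grids and then a second color-mapping pass.
-- intended difference: On rot180 of a grid that has rows but an empty first row, A returns [] (its zip-based transpose collapses the grid), while B returns the same number of empty rows; a 180-degree rotation preserves the grid's dimensions, so B's value is the intended one. — e.g. on transform_pair([("input", [[]])], "rot180", [0, 1, 2, 3, 4, 5, 6, 7, 8, 9]): A returns [("input", [])], B returns [("input", [[]])]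
import Mathlib
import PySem

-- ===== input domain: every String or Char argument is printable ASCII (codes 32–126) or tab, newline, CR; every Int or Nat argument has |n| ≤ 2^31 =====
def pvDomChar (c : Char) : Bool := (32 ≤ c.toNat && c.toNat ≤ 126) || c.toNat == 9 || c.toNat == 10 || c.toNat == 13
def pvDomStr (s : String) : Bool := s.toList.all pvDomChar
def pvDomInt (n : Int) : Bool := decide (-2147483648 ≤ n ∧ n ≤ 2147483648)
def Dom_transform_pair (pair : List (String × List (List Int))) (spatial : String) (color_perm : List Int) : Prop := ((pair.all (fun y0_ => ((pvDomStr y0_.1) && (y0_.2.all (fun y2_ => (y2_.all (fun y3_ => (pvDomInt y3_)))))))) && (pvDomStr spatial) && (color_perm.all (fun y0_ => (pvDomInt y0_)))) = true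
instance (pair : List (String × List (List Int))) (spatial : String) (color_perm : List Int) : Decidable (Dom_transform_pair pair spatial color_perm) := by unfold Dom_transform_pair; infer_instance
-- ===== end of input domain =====

-- B replaces A's iterated zip-transpose rotations by one fused pass per grid (closed-form
-- source-index maps with the colour permutation applied in the same comprehension); on the
-- degenerate rot180 grids with rows but an empty first row B keeps the row count A drops (D_).


-- ===== PORT A =====

-- [row[:] for row in grid]
def pvCopy (grid : List (List Int)) : List (List Int) := grid.map (fun row => row)

def pvMinLen (rs : List (List Int)) (a : Nat) : Nat := rs.foldl (fun m r => min m r.length) a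

-- hand port of Python's zip(*grid) over a list of rows (PySem has no variadic zip): the
-- transpose truncated to the shortest row, [] when there are no rows — exact; the inner
-- getD is only evaluated at j < every row's length, so the default is never used.
def pvZipT (grid : List (List Int)) : List (List Int) :=
  match grid with
  | [] => []
  | r :: rs => (List.range (pvMinLen rs r.length)).map (fun j => (r :: rs).map (fun row => row.getD j 0))

def rotate_grid (grid : List (List Int)) (k : Int) : List (List Int) :=
  let k2 := PySem.Int.mod k 4
  if k2 = 0 then pvCopy grid
  else (List.range k2.toNat).foldl (fun out _ => (pvZipT out).reverse) (pvCopy grid)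

def flip_horizontal (grid : List (List Int)) : List (List Int) := grid.map (fun row => row.reverse)

def flip_vertical (grid : List (List Int)) : List (List Int) := grid.reverse.map (fun row => row)

def transpose_grid (grid : List (List Int)) : List (List Int) := pvZipT grid

def apply_spatial_transform (grid : List (List Int)) (transform_name : String) : List (List Int) :=
  if transform_name = "identity" then pvCopy grid
  else if transform_name = "rot90" then rotate_grid grid 1
  else if transform_name = "rot180" then rotate_grid grid 2
  else if transform_name = "rot270" then rotate_grid grid 3
  else if transform_name = "flip_h" then flip_horizontal grid
  else if transform_name = "flip_v" then flip_vertical grid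
  else if transform_name = "transpose" then transpose_grid grid
  else grid  -- raise ValueError: excluded by Pre_

def apply_color_permutation (grid : List (List Int)) (perm : List Int) : List (List Int) :=
  if perm.length ≠ 10 then grid  -- raise ValueError: excluded by Pre_
  else if PySem.List.sorted perm (fun x => x) false ≠ PySem.List.pyRange 0 10 1 then grid  -- raise: excluded by Pre_
  else grid.map (fun row => row.map (fun v => (PySem.List.pyGet? perm v).getD 0))  -- perm[value]; IndexError excluded by Pre_

-- '"k" in pair' / 'pair["k"]' on a dict: first-match lookup (exact; dicts have unique keys)
def pvGetKey (pair : List (String × List (List Int))) (k : String) : Option (List (List Int)) :=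
  match pair with
  | [] => none
  | (k', v) :: rest => if k' = k then some v else pvGetKey rest k

def transform_pair (pair : List (String × List (List Int))) (spatial : String) (color_perm : List Int) : List (String × List (List Int)) :=
  let new_pair : List (String × List (List Int)) :=
    match pvGetKey pair "input" with
    | some g => [("input", apply_color_permutation (apply_spatial_transform g spatial) color_perm)]
    | none => []
  let new_pair :=
    match pvGetKey pair "output" with
    | some g => new_pair ++ [("output", apply_color_permutation (apply_spatial_transform g spatial) color_perm)]
    | none => new_pair
  pair.foldl (fun np kv => if (np.map Prod.fst).contains kv.1 then np else np ++ [kv]) new_pair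

-- ===== PORT B =====

-- color_perm[v]; IndexError excluded by Pre_
def pvLookB (perm : List Int) (v : Int) : Int := (PySem.List.pyGet? perm v).getD 0

-- Source B's mapped(grid): one fused pass, output cell = perm[grid[src i j]]; the raise branches
-- return grid (excluded by Pre_); the getD-indexing is only reached in range under Pre_.
def pvMapped (spatial : String) (perm : List Int) (grid : List (List Int)) : List (List Int) :=
  if ¬ (spatial = "identity" ∨ spatial = "rot90" ∨ spatial = "rot180" ∨ spatial = "rot270"
        ∨ spatial = "flip_h" ∨ spatial = "flip_v" ∨ spatial = "transpose") then grid  -- raise: excluded by Pre_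
  else if perm.length ≠ 10 then grid  -- raise: excluded by Pre_
  else if PySem.List.sorted perm (fun x => x) false ≠ PySem.List.pyRange 0 10 1 then grid  -- raise: excluded by Pre_
  else if spatial = "identity" then grid.map (fun row => row.map (pvLookB perm))
  else if spatial = "flip_h" then grid.map (fun row => row.reverse.map (pvLookB perm))
  else if spatial = "flip_v" then grid.reverse.map (fun row => row.map (pvLookB perm))
  else
    let R := grid.length
    let C := (grid.headD []).length
    let rcs : Nat × Nat × (Nat → Nat → Nat × Nat) :=
      if spatial = "rot90" then (C, R, fun i j => (j, C - 1 - i))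
      else if spatial = "rot180" then (R, C, fun i j => (R - 1 - i, C - 1 - j))
      else if spatial = "rot270" then (C, R, fun i j => (R - 1 - j, i))
      else (C, R, fun i j => (j, i))  -- transpose
    (List.range rcs.1).map (fun i => (List.range rcs.2.1).map (fun j =>
      pvLookB perm ((grid.getD (rcs.2.2 i j).1 []).getD (rcs.2.2 i j).2 0)))

def transform_pair_alt (pair : List (String × List (List Int))) (spatial : String) (color_perm : List Int) : List (String × List (List Int)) :=
  let new_pair : List (String × List (List Int)) :=
    match pvGetKey pair "input" with
    | some g => [("input", pvMapped spatial color_perm g)]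
    | none => []
  let new_pair :=
    match pvGetKey pair "output" with
    | some g => new_pair ++ [("output", pvMapped spatial color_perm g)]
    | none => new_pair
  pair.foldl (fun np kv => if (np.map Prod.fst).contains kv.1 then np else np ++ [kv]) new_pair

-- ===== PRECONDITION & SPEC =====

-- Pre_ admits the inputs where neither Python raises: whenever an "input"/"output" key is
-- present, the spatial name must be known and color_perm a permutation of 0..9 (else A raises
-- ValueError), every cell A's transform keeps must lie in [-10, 9] (else A raises IndexError
-- at perm[value]), and for the rot/transpose family no row may be shorter than the first row:
-- on such ragged grids A's zip silently truncates to the shortest row while B's index maps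
-- raise IndexError, so they are excluded (see cites).
def pvCellOK (v : Int) : Prop := -10 ≤ v ∧ v ≤ 9

def pvGridOK (spatial : String) (g : List (List Int)) : Prop :=
  if spatial = "rot90" ∨ spatial = "rot180" ∨ spatial = "rot270" ∨ spatial = "transpose" then
    (∀ r ∈ g, (g.headD []).length ≤ r.length) ∧
      ∀ r ∈ g, ∀ v ∈ r.take (g.headD []).length, pvCellOK v
  else ∀ r ∈ g, ∀ v ∈ r, pvCellOK v

def Pre_transform_pair (pair : List (String × List (List Int))) (spatial : String) (color_perm : List Int) : Prop :=
  ((pair.lookup "input").isSome ∨ (pair.lookup "output").isSome) →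
    ((spatial = "identity" ∨ spatial = "rot90" ∨ spatial = "rot180" ∨ spatial = "rot270"
        ∨ spatial = "flip_h" ∨ spatial = "flip_v" ∨ spatial = "transpose")
     ∧ color_perm.Perm [0, 1, 2, 3, 4, 5, 6, 7, 8, 9]
     ∧ pvGridOK spatial ((pair.lookup "input").getD [])
     ∧ pvGridOK spatial ((pair.lookup "output").getD []))

instance (pair : List (String × List (List Int))) (spatial : String) (color_perm : List Int) : Decidable (Pre_transform_pair pair spatial color_perm) := by unfold Pre_transform_pair pvGridOK pvCellOK; infer_instance

def pvWitness_transform_pair : (List (String × List (List Int))) × String × List Int :=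
  ([("input", [[1, 2], [3, 4]]), ("output", [[5]]), ("extra", [[77]])], "rot90", [0, 2, 1, 3, 4, 5, 6, 7, 8, 9])

-- a grid with at least one row but an empty first row (under zip they collapse to [])
def pvDegen (g : List (List Int)) : Prop := g.headD [0] = []

-- On rot180 of a grid that has rows but an empty first row, A returns [] (its zip-transpose
-- collapses the grid), while B returns the same number of empty rows; a 180° rotation
-- preserves the grid's dimensions, so B's value is the intended one.
def D_transform_pair (pair : List (String × List (List Int))) (spatial : String) (color_perm : List Int) : Prop :=
  spatial = "rot180" ∧
    (pvDegen ((pair.lookup "input").getD []) ∨ pvDegen ((pair.lookup "output").getD []))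

instance (pair : List (String × List (List Int))) (spatial : String) (color_perm : List Int) : Decidable (D_transform_pair pair spatial color_perm) := by unfold D_transform_pair pvDegen; infer_instance

def Spec_transform_pair (pair : List (String × List (List Int))) (spatial : String) (color_perm : List Int) (out : List (String × List (List Int))) : Prop := ¬ D_transform_pair pair spatial color_perm → out = transform_pair_alt pair spatial color_perm
instance (pair : List (String × List (List Int))) (spatial : String) (color_perm : List Int) (out : List (String × List (List Int))) : Decidable (Spec_transform_pair pair spatial color_perm out) := by unfold Spec_transform_pair; infer_instance

def pvDiffWitness_transform_pair : (List (String × List (List Int))) × String × List Int :=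
  ([("input", [[]])], "rot180", [0, 1, 2, 3, 4, 5, 6, 7, 8, 9])

def pvDiffWitnessOut_transform_pair : (List (String × List (List Int))) × (List (String × List (List Int))) :=
  ([("input", [])], [("input", [[]])])

-- ===== CLAIM =====

def Claim_unchanged_transform_pair : Prop := ∀ (pair : List (String × List (List Int))) (spatial : String) (color_perm : List Int), Dom_transform_pair pair spatial color_perm → Pre_transform_pair pair spatial color_perm → Spec_transform_pair pair spatial color_perm (transform_pair pair spatial color_perm)

def Claim_changed_transform_pair : Prop := Dom_transform_pair (pvDiffWitness_transform_pair.1) (pvDiffWitness_transform_pair.2.1) (pvDiffWitness_transform_pair.2.2) ∧ Pre_transform_pair (pvDiffWitness_transform_pair.1) (pvDiffWitness_transform_pair.2.1) (pvDiffWitness_transform_pair.2.2) ∧ D_transform_pair (pvDiffWitness_transform_pair.1) (pvDiffWitness_transform_pair.2.1) (pvDiffWitness_transform_pair.2.2) ∧ transform_pair (pvDiffWitness_transform_pair.1) (pvDiffWitness_transform_pair.2.1) (pvDiffWitness_transform_pair.2.2) = pvDiffWitnessOut_transform_pair.1 ∧ transform_pair_alt (pvDiffWitness_transform_pair.1) (pvDiffWitness_transform_pair.2.1)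 (pvDiffWitness_transform_pair.2.2) = pvDiffWitnessOut_transform_pair.2 ∧ pvDiffWitnessOut_transform_pair.1 ≠ pvDiffWitnessOut_transform_pair.2

def Claim_exact_transform_pair : Prop := ∀ (pair : List (String × List (List Int))) (spatial : String) (color_perm : List Int), Dom_transform_pair pair spatial color_perm → Pre_transform_pair pair spatial color_perm → D_transform_pair pair spatial color_perm → transform_pair pair spatial color_perm ≠ transform_pair_alt pair spatial color_perm

-- ===== LEMMAS AND PROOFS =====

-- the normal form both sides are reduced to: an R×C grid of indexed cells
def pvM (R C : Nat) (f : Nat → Nat → Int) : List (List Int) :=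
  (List.range R).map (fun i => (List.range C).map (fun j => f i j))

def pvGf (g : List (List Int)) (i j : Nat) : Int := (g.getD i []).getD j 0

theorem pvM_congr {R C : Nat} {f f' : Nat → Nat → Int}
    (h : ∀ i < R, ∀ j < C, f i j = f' i j) : pvM R C f = pvM R C f' := by
  unfold pvM
  refine List.map_congr_left ?_
  intro i hi
  refine List.map_congr_left ?_
  intro j hj
  exact h i (List.mem_range.mp hi) j (List.mem_range.mp hj)

theorem pv_map_eq_range_getD {α β : Type} (xs : List α) (d : α) (f : α → β) :
    xs.map f = (List.range xs.length).map (fun i => f (xs.getD i d)) := by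
  apply List.ext_getElem
  · simp
  · intro i h1 h2
    simp only [List.getElem_map, List.getElem_range]
    congr 1
    rw [List.getD_eq_getElem?_getD, List.getElem?_eq_getElem (by simpa using h1)]
    rfl

theorem pv_reverse_range_map {α : Type} (n : Nat) (f : Nat → α) :
    ((List.range n).map f).reverse = (List.range n).map (fun i => f (n - 1 - i)) := by
  apply List.ext_getElem
  · simp
  · intro i h1 h2
    simp only [List.getElem_reverse, List.getElem_map, List.getElem_range,
      List.length_map, List.length_range]

theorem pvMinLen_eq (rs : List (List Int)) (a : Nat) (h : ∀ r ∈ rs, a ≤ r.length) :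
    pvMinLen rs a = a := by
  induction rs with
  | nil => rfl
  | cons r rs ih =>
    have : min a r.length = a := by
      have := h r (List.mem_cons_self)
      omega
    simp only [pvMinLen, List.foldl_cons, this]
    exact ih (fun r hr => h r (List.mem_cons_of_mem _ hr))

theorem pvZipT_eq (g : List (List Int)) (h : ∀ r ∈ g, (g.headD []).length ≤ r.length) :
    pvZipT g = pvM (g.headD []).length g.length (fun i j => pvGf g j i) := by
  cases g with
  | nil => rfl
  | cons r rs =>
    simp only [pvZipT, List.headD_cons] at *
    rw [pvMinLen_eq rs r.length (fun x hx => h x (List.mem_cons_of_mem _ hx))]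
    unfold pvM
    refine List.map_congr_left ?_
    intro j _
    exact pv_map_eq_range_getD (r :: rs) [] (fun row => row.getD j 0)

theorem pvGf_M {R C : Nat} {f : Nat → Nat → Int} {i j : Nat} (hi : i < R) (hj : j < C) :
    pvGf (pvM R C f) i j = f i j := by
  unfold pvGf pvM
  simp [List.getD_eq_getElem?_getD, List.getElem?_map, List.getElem?_range, hi, hj]

theorem pvM_head {R C : Nat} {f : Nat → Nat → Int} (h : 0 < R) :
    (pvM R C f).headD [] = (List.range C).map (f 0) := by
  cases R with
  | zero => omega
  | succ n => simp [pvM, List.range_succ_eq_map]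

theorem pvM_length (R C : Nat) (f : Nat → Nat → Int) : (pvM R C f).length = R := by
  simp [pvM]

theorem pvM_ge {R C : Nat} {f : Nat → Nat → Int} :
    ∀ r ∈ pvM R C f, ((pvM R C f).headD []).length ≤ r.length := by
  intro r hr
  have hlenr : r.length = C := by
    simp only [pvM] at hr
    obtain ⟨i, hi, rfl⟩ := List.mem_map.mp hr
    simp
  cases hM : pvM R C f with
  | nil => simp
  | cons hd t =>
    have hmem : hd ∈ pvM R C f := by rw [hM]; exact List.mem_cons_self
    have hlenh : hd.length = C := by
      simp only [pvM] at hmem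
      obtain ⟨i, hi, rfl⟩ := List.mem_map.mp hmem
      simp
    simp [hlenh, hlenr]

-- one zip-transpose-reverse step on a grid in normal form
theorem pvStep_M {R C : Nat} {f : Nat → Nat → Int} (hR : 0 < R) :
    (pvZipT (pvM R C f)).reverse = pvM C R (fun i j => f j (C - 1 - i)) := by
  rw [pvZipT_eq _ pvM_ge, pvM_head hR, pvM_length]
  simp only [List.length_map, List.length_range]
  have h1 : pvM C R (fun i j => pvGf (pvM R C f) j i) = pvM C R (fun i j => f j i) :=
    pvM_congr (fun i hi j hj => pvGf_M hj hi)
  rw [h1]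
  unfold pvM
  rw [pv_reverse_range_map]

-- a first step on any grid all of whose rows reach the first row's length
theorem pvStep_g (g : List (List Int)) (h : ∀ r ∈ g, (g.headD []).length ≤ r.length) :
    (pvZipT g).reverse = pvM (g.headD []).length g.length (fun i j => pvGf g j ((g.headD []).length - 1 - i)) := by
  rw [pvZipT_eq g h]
  unfold pvM
  rw [pv_reverse_range_map]

theorem pv_color_M (R C : Nat) (f : Nat → Nat → Int) (look : Int → Int) :
    (pvM R C f).map (fun row => row.map look) = pvM R C (fun i j => look (f i j)) := by
  simp [pvM, List.map_map]

theorem pv_perm_checks (perm : List Int) (h : perm.Perm [0, 1, 2, 3, 4, 5, 6, 7, 8, 9]) :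
    perm.length = 10 ∧ PySem.List.sorted perm (fun x => x) false = PySem.List.pyRange 0 10 1 := by
  constructor
  · simpa using h.length_eq
  · have : PySem.List.pyRange 0 10 1 = [0, 1, 2, 3, 4, 5, 6, 7, 8, 9] := by decide
    rw [this]
    exact PySem.List.sorted_eq_of_perm_of_pairwise_lt perm [0, 1, 2, 3, 4, 5, 6, 7, 8, 9]
      (fun x => x) h.symm (by decide)

-- A's colour pass with a valid permutation
theorem pv_color_eq (g : List (List Int)) (perm : List Int) (h : perm.Perm [0, 1, 2, 3, 4, 5, 6, 7, 8, 9]) :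
    apply_color_permutation g perm = g.map (fun row => row.map (pvLookB perm)) := by
  obtain ⟨h1, h2⟩ := pv_perm_checks perm h
  simp [apply_color_permutation, h1, h2, pvLookB]

theorem pvCopy_eq (g : List (List Int)) : pvCopy g = g := by
  simp [pvCopy]

-- unfoldings of rotate_grid at the three literal k's
theorem pv_rot1 (g : List (List Int)) : rotate_grid g 1 = (pvZipT g).reverse := by
  have h : PySem.Int.mod 1 4 = 1 := by decide
  simp only [rotate_grid, h]
  norm_num [List.range_succ, pvCopy_eq]

theorem pv_rot2 (g : List (List Int)) : rotate_grid g 2 = (pvZipT ((pvZipT g).reverse)).reverse := by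
  have h : PySem.Int.mod 2 4 = 2 := by decide
  simp only [rotate_grid, h]
  norm_num [show (2 : Int).toNat = 2 from rfl, List.range_succ, pvCopy_eq]

theorem pv_rot3 (g : List (List Int)) :
    rotate_grid g 3 = (pvZipT ((pvZipT ((pvZipT g).reverse)).reverse)).reverse := by
  have h : PySem.Int.mod 3 4 = 3 := by decide
  simp only [rotate_grid, h]
  norm_num [show (3 : Int).toNat = 3 from rfl, List.range_succ, pvCopy_eq]

theorem pvGridOK_ge (sp : String) (g : List (List Int)) (hok : pvGridOK sp g)
    (h : sp = "rot90" ∨ sp = "rot180" ∨ sp = "rot270" ∨ sp = "transpose") :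
    ∀ r ∈ g, (g.headD []).length ≤ r.length := by
  unfold pvGridOK at hok
  rw [if_pos h] at hok
  exact hok.1

-- the per-grid equivalence, one case per spatial name
theorem pv_grid_eq (spatial : String) (perm : List Int) (g : List (List Int))
    (hsp : spatial = "identity" ∨ spatial = "rot90" ∨ spatial = "rot180" ∨ spatial = "rot270"
        ∨ spatial = "flip_h" ∨ spatial = "flip_v" ∨ spatial = "transpose")
    (hperm : perm.Perm [0, 1, 2, 3, 4, 5, 6, 7, 8, 9])
    (hok : pvGridOK spatial g)
    (hdeg : spatial = "rot180" → ¬ pvDegen g) :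
    apply_color_permutation (apply_spatial_transform g spatial) perm = pvMapped spatial perm g := by
  obtain ⟨hlen, hsort⟩ := pv_perm_checks perm hperm
  rcases hsp with h | h | h | h | h | h | h <;> subst h
  · -- identity
    rw [pv_color_eq _ _ hperm]
    have ha : apply_spatial_transform g "identity" = g := by
      simp [apply_spatial_transform, pvCopy]
    rw [ha]
    simp [pvMapped, hlen, hsort]
  · -- rot90
    have hge := pvGridOK_ge _ g hok (by norm_num)
    rw [pv_color_eq _ _ hperm]
    have ha : apply_spatial_transform g "rot90" = (pvZipT g).reverse := by
      simp [apply_spatial_transform, pv_rot1]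
    rw [ha, pvStep_g g hge, pv_color_M]
    simp [pvMapped, hlen, hsort, pvM, pvGf]
  · -- rot180
    have hge := pvGridOK_ge _ g hok (by norm_num)
    rw [pv_color_eq _ _ hperm]
    have ha : apply_spatial_transform g "rot180" = (pvZipT ((pvZipT g).reverse)).reverse := by
      simp [apply_spatial_transform, pv_rot2]
    rw [ha]
    cases g with
    | nil =>
      simp [pvZipT, pvMapped, hlen, hsort, pvM]
    | cons r rs =>
      have hC : 0 < (((r :: rs) : List (List Int)).headD []).length := by
        have hr := hdeg rfl
        simp only [pvDegen, List.headD_cons] at hr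
        simp only [List.headD_cons]
        cases r with
        | nil => exact absurd rfl hr
        | cons a as => simp
      rw [pvStep_g (r :: rs) hge, pvStep_M hC, pv_color_M]
      simp [pvMapped, hlen, hsort, pvM, pvGf]
  · -- rot270
    have hge := pvGridOK_ge _ g hok (by norm_num)
    rw [pv_color_eq _ _ hperm]
    have ha : apply_spatial_transform g "rot270" = (pvZipT ((pvZipT ((pvZipT g).reverse)).reverse)).reverse := by
      simp [apply_spatial_transform, pv_rot3]
    rw [ha]
    rcases Nat.eq_zero_or_pos ((g.headD []).length) with hC | hC
    · -- zero columns: every zip collapses to []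
      have hC' : (g.head?.getD []).length = 0 := by
        rw [← List.headD_eq_head?_getD]; exact hC
      have h1 : pvZipT g = [] := by
        rw [pvZipT_eq g hge, hC]
        simp [pvM]
      rw [h1]
      simp [pvZipT, pvMapped, hlen, hsort, hC']
    · have hR : 0 < g.length := by
        cases g with
        | nil => simp at hC
        | cons r rs => simp
      rw [pvStep_g g hge, pvStep_M hC, pvStep_M hR, pv_color_M]
      have harith : pvM (g.headD []).length g.length
            (fun i j => pvLookB perm (pvGf g (g.length - 1 - j) ((g.headD []).length - 1 - ((g.headD []).length - 1 - i))))
          = pvM (g.headD []).length g.length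
            (fun i j => pvLookB perm (pvGf g (g.length - 1 - j) i)) :=
        pvM_congr (fun i hi j hj => by congr 2; omega)
      rw [harith]
      simp [pvMapped, hlen, hsort, pvM, pvGf]
  · -- flip_h
    rw [pv_color_eq _ _ hperm]
    have ha : apply_spatial_transform g "flip_h" = flip_horizontal g := by
      simp [apply_spatial_transform]
    rw [ha]
    simp [flip_horizontal, pvMapped, hlen, hsort, List.map_map]
  · -- flip_v
    rw [pv_color_eq _ _ hperm]
    have ha : apply_spatial_transform g "flip_v" = flip_vertical g := by
      simp [apply_spatial_transform]
    rw [ha]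
    simp [flip_vertical, pvMapped, hlen, hsort, List.map_map]
  · -- transpose
    have hge := pvGridOK_ge _ g hok (by norm_num)
    rw [pv_color_eq _ _ hperm]
    have ha : apply_spatial_transform g "transpose" = pvZipT g := by
      simp [apply_spatial_transform, transpose_grid]
    rw [ha, pvZipT_eq g hge, pv_color_M]
    simp [pvMapped, hlen, hsort, pvM, pvGf]

-- the extras loop only ever appends
theorem pv_foldl_prefix (l : List (String × List (List Int))) (np : List (String × List (List Int))) :
    ∃ t, l.foldl (fun np kv => if (np.map Prod.fst).contains kv.1 then np else np ++ [kv]) np = np ++ t := by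
  induction l generalizing np with
  | nil => exact ⟨[], by simp⟩
  | cons kv rest ih =>
    simp only [List.foldl_cons]
    by_cases h : (np.map Prod.fst).contains kv.1 = true
    · rw [if_pos h]; exact ih np
    · rw [if_neg h]
      obtain ⟨t, ht⟩ := ih (np ++ [kv])
      exact ⟨kv :: t, by rw [ht]; simp⟩

-- the degenerate collapse on A's side: rows but an empty first row ⇒ rot180 gives []
theorem pvMinLen_zero (rs : List (List Int)) : pvMinLen rs 0 = 0 := by
  induction rs with
  | nil => rfl
  | cons r rs ih => simpa [pvMinLen, List.foldl_cons] using ih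

theorem pv_rot180_degen (perm : List Int) (r : List Int) (rs : List (List Int)) (hr : r = []) :
    apply_color_permutation (apply_spatial_transform (r :: rs) "rot180") perm = [] := by
  subst hr
  simp only [apply_spatial_transform, reduceIte, pv_rot2]
  have h1 : pvZipT ([] :: rs) = [] := by
    simp [pvZipT, pvMinLen_zero]
  rw [h1]
  simp [pvZipT, apply_color_permutation]

theorem pv_mapped_degen (perm : List Int) (r : List Int) (rs : List (List Int)) (hr : r = [])
    (hperm : perm.Perm [0, 1, 2, 3, 4, 5, 6, 7, 8, 9]) :
    pvMapped "rot180" perm (r :: rs) = (r :: rs).map (fun _ => []) := by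
  obtain ⟨hlen, hsort⟩ := pv_perm_checks perm hperm
  subst hr
  simp [pvMapped, hlen, hsort, List.map_const', List.replicate_succ]

theorem pv_foldl_head_ne (l : List (String × List (List Int))) (x y : String × List (List Int))
    (rx ry : List (String × List (List Int))) (h : x ≠ y) :
    l.foldl (fun np kv => if (np.map Prod.fst).contains kv.1 then np else np ++ [kv]) (x :: rx)
      ≠ l.foldl (fun np kv => if (np.map Prod.fst).contains kv.1 then np else np ++ [kv]) (y :: ry) := by
  intro he
  obtain ⟨tx, hx⟩ := pv_foldl_prefix l (x :: rx)
  obtain ⟨ty, hy⟩ := pv_foldl_prefix l (y :: ry)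
  rw [hx, hy] at he
  simp only [List.cons_append, List.cons.injEq] at he
  exact h he.1

theorem pv_foldl_second_ne (l : List (String × List (List Int))) (x a b : String × List (List Int))
    (rx ry : List (String × List (List Int))) (h : a ≠ b) :
    l.foldl (fun np kv => if (np.map Prod.fst).contains kv.1 then np else np ++ [kv]) (x :: a :: rx)
      ≠ l.foldl (fun np kv => if (np.map Prod.fst).contains kv.1 then np else np ++ [kv]) (x :: b :: ry) := by
  intro he
  obtain ⟨tx, hx⟩ := pv_foldl_prefix l (x :: a :: rx)
  obtain ⟨ty, hy⟩ := pv_foldl_prefix l (x :: b :: ry)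
  rw [hx, hy] at he
  simp only [List.cons_append, List.cons.injEq] at he
  exact h he.2.1

theorem pvLookup_eq (pair : List (String × List (List Int))) (k : String) :
    pair.lookup k = pvGetKey pair k := by
  induction pair with
  | nil => rfl
  | cons hd tl ih =>
    obtain ⟨k', v⟩ := hd
    by_cases h : k' = k
    · simp [List.lookup, pvGetKey, h]
    · have hb : (k == k') = false := by simp [Ne.symm h]
      simp [List.lookup, pvGetKey, hb, h, ih]

theorem pv_degen_isSome (o : Option (List (List Int))) (h : pvDegen (o.getD [])) : o.isSome := by
  cases o with
  | none => simp [pvDegen] at h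
  | some g => rfl

-- ===== VERDICT =====

theorem transform_pair_spec : Claim_unchanged_transform_pair := by
  intro pair spatial color_perm _ hpre hnd
  simp only [Pre_transform_pair, pvLookup_eq] at hpre
  simp only [D_transform_pair, pvLookup_eq] at hnd
  simp only [transform_pair, transform_pair_alt]
  cases hI : pvGetKey pair "input" with
  | none =>
    cases hO : pvGetKey pair "output" with
    | none => rfl
    | some gO =>
      dsimp only
      obtain ⟨hsp, hperm, _, hokO⟩ := hpre (by simp [hI, hO])
      rw [hO] at hokO
      have hdO : spatial = "rot180" → ¬ pvDegen gO := by
        intro hs hdeg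
        exact hnd ⟨hs, Or.inr (by simpa [hO] using hdeg)⟩
      rw [pv_grid_eq spatial color_perm gO hsp hperm hokO hdO]
  | some gI =>
    obtain ⟨hsp, hperm, hokI, hokO⟩ := hpre (by simp [hI])
    rw [hI] at hokI
    have hdI : spatial = "rot180" → ¬ pvDegen gI := by
      intro hs hdeg
      exact hnd ⟨hs, Or.inl (by simpa [hI] using hdeg)⟩
    cases hO : pvGetKey pair "output" with
    | none =>
      dsimp only
      rw [pv_grid_eq spatial color_perm gI hsp hperm hokI hdI]
    | some gO =>
      dsimp only
      rw [hO] at hokO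
      have hdO : spatial = "rot180" → ¬ pvDegen gO := by
        intro hs hdeg
        exact hnd ⟨hs, Or.inr (by simpa [hO] using hdeg)⟩
      rw [pv_grid_eq spatial color_perm gI hsp hperm hokI hdI,
          pv_grid_eq spatial color_perm gO hsp hperm hokO hdO]

theorem transform_pair_changed : Claim_changed_transform_pair := by
  unfold Claim_changed_transform_pair; decide

theorem transform_pair_tight : Claim_exact_transform_pair := by
  intro pair spatial color_perm _ hpre hd heq
  obtain ⟨hs, hdeg⟩ := hd
  subst hs
  simp only [pvLookup_eq] at hdeg
  simp only [Pre_transform_pair, pvLookup_eq] at hpre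
  have hor : (pvGetKey pair "input").isSome ∨ (pvGetKey pair "output").isSome :=
    hdeg.imp (pv_degen_isSome _) (pv_degen_isSome _)
  obtain ⟨hsp, hperm, hokI, hokO⟩ := hpre hor
  simp only [transform_pair, transform_pair_alt] at heq
  by_cases hdi : pvDegen ((pvGetKey pair "input").getD [])
  · -- the "input" grid collapses
    cases hI : pvGetKey pair "input" with
    | none => rw [hI] at hdi; simp [pvDegen] at hdi
    | some gI =>
      rw [hI] at hdi
      simp only [Option.getD_some] at hdi
      cases gI with
      | nil => simp [pvDegen] at hdi
      | cons r rs =>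
        have hr : r = [] := by simpa [pvDegen] using hdi
        have hA := pv_rot180_degen color_perm r rs hr
        have hB := pv_mapped_degen color_perm r rs hr hperm
        rw [hI] at heq
        cases hO : pvGetKey pair "output" with
        | none =>
          rw [hO] at heq
          dsimp only at heq
          rw [hA, hB] at heq
          exact pv_foldl_head_ne pair _ _ _ _ (by simp) heq
        | some gO =>
          rw [hO] at heq
          dsimp only at heq
          simp only [List.cons_append, List.nil_append] at heq
          rw [hA, hB] at heq
          exact pv_foldl_head_ne pair _ _ _ _ (by simp) heq
  · -- then the "output" grid collapses, and the "input" grids (if any) agree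
    have hdo : pvDegen ((pvGetKey pair "output").getD []) := hdeg.resolve_left hdi
    cases hO : pvGetKey pair "output" with
    | none => rw [hO] at hdo; simp [pvDegen] at hdo
    | some gO =>
      rw [hO] at hdo
      simp only [Option.getD_some] at hdo
      cases gO with
      | nil => simp [pvDegen] at hdo
      | cons r rs =>
        have hr : r = [] := by simpa [pvDegen] using hdo
        have hA := pv_rot180_degen color_perm r rs hr
        have hB := pv_mapped_degen color_perm r rs hr hperm
        rw [hO] at heq
        cases hI : pvGetKey pair "input" with
        | none =>
          rw [hI] at heq
          dsimp only at heq
          simp only [List.nil_append] at heq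
          rw [hA, hB] at heq
          exact pv_foldl_head_ne pair _ _ _ _ (by simp) heq
        | some gI =>
          rw [hI] at hokI
          have hdI : ("rot180" : String) = "rot180" → ¬ pvDegen gI := by
            intro _ hdg
            exact hdi (by rw [hI]; simpa using hdg)
          rw [hI] at heq
          dsimp only at heq
          simp only [List.cons_append, List.nil_append] at heq
          rw [hA, hB, pv_grid_eq "rot180" color_perm gI (by norm_num) hperm hokI hdI] at heq
          exact pv_foldl_second_ne pair _ _ _ _ _ (by simp) heq
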